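-- pv_equiv track=rewrite | github.com/Valinetsky/PythonSeminars | Seminar03/HomeWorkTask20.py | symbolCheck
-- ===== SOURCE A (Python) =====
-- def symbolCheck(text, start, end):
--     if len(text) < 1:
--         return False
--     localText = text.upper()
--     for letter in localText:
--         if letter < start or letter > end:
--             return False
--     return True
-- ===== SOURCE B (Python) =====
-- def symbolCheck(text, start, end):
--     if len(text) < 1:
--         return False
--     localText = text.upper()
--     return min(localText) >= start and max(localText) <= end
-- ===== Notes on version B (the rewrite author's own statement) =====
-- stated objective: idiomatic
-- what changed: Replaces the short-circuiting per-character comparison loop with computing min and max of the uppercased text and comparing only those two aggregates against the bounds.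
import Mathlib
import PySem

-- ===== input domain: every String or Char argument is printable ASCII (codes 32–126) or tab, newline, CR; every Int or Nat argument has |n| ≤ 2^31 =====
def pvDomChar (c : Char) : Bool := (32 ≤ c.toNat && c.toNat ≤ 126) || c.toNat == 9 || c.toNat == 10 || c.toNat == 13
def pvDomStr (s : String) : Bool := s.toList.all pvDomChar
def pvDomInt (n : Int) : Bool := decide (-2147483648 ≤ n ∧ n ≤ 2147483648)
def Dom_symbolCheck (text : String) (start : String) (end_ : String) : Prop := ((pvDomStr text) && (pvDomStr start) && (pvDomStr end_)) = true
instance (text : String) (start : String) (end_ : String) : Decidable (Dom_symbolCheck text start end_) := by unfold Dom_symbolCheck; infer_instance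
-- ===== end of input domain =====

-- B replaces A's short-circuiting per-character bounds loop with min/max aggregation over the uppercased text (idiomatic; same cost).


-- ===== PORT A =====
-- Python string comparison is code-point lexicographic = Lean '<' on List Char (PYSEM.md);
-- the loop variable 'letter' is the one-character string [c].
def symbolCheckGo (start end_ : List Char) : List Char → Bool
  | [] => true
  | c :: rest =>
      if [c] < start ∨ end_ < [c] then false else symbolCheckGo start end_ rest

def symbolCheck (text : String) (start : String) (end_ : String) : Bool :=
  if text.length < 1 then false
  else symbolCheckGo start.toList end_.toList (PySem.Str.upper text).toList

-- ===== PORT B =====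
-- min(localText) / max(localText) iterate the one-character strings of localText.
def symbolCheck_alt (text : String) (start : String) (end_ : String) : Bool :=
  if text.length < 1 then false
  else
    let u := (PySem.Str.upper text).toList.map (fun c => [c])
    match PySem.List.min? u (fun x => x), PySem.List.max? u (fun x => x) with
    | some mn, some mx => decide (start.toList ≤ mn) && decide (mx ≤ end_.toList)
    | _, _ => false

-- ===== PRECONDITION & SPEC =====
def Spec_symbolCheck (text : String) (start : String) (end_ : String) (out : Bool) : Prop := out = symbolCheck_alt text start end_
instance (text : String) (start : String) (end_ : String) (out : Bool) : Decidable (Spec_symbolCheck text start end_ out) := by unfold Spec_symbolCheck; infer_instance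

-- ===== CLAIM (what is proved, stated in full; the proofs are below) =====
def Claim_equal_symbolCheck : Prop := ∀ (text : String) (start : String) (end_ : String), Dom_symbolCheck text start end_ → Spec_symbolCheck text start end_ (symbolCheck text start end_)

-- ===== LEMMAS AND PROOFS =====
theorem symbolCheckGo_eq_all (s e : List Char) (cs : List Char) :
    symbolCheckGo s e cs = cs.all (fun c => decide (s ≤ [c]) && decide ([c] ≤ e)) := by
  induction cs with
  | nil => rfl
  | cons c rest ih =>
      simp only [symbolCheckGo, List.all_cons, ih]
      by_cases h : [c] < s ∨ e < [c]
      · rcases h with h | h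
        · simp [h, not_le.mpr h]
        · simp [h, not_le.mpr h]
      · push Not at h
        simp [h.1, h.2, not_lt.mpr h.1, not_lt.mpr h.2]

theorem main_eq (s e : List Char) (cs : List Char) (hne : cs ≠ []) :
    symbolCheckGo s e cs =
      (match PySem.List.min? (cs.map (fun c => [c])) (fun x => x),
             PySem.List.max? (cs.map (fun c => [c])) (fun x => x) with
       | some mn, some mx => decide (s ≤ mn) && decide (mx ≤ e)
       | _, _ => false) := by
  have hu : cs.map (fun c => ([c] : List Char)) ≠ [] := by
    simpa using hne
  rcases hmn : PySem.List.min? (cs.map (fun c => ([c] : List Char))) (fun x => x) with _ | mn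
  · exact absurd ((PySem.List.min?_eq_none_iff _ _).mp hmn) hu
  rcases hmx : PySem.List.max? (cs.map (fun c => ([c] : List Char))) (fun x => x) with _ | mx
  · exact absurd ((PySem.List.max?_eq_none_iff _ _).mp hmx) hu
  simp only [symbolCheckGo_eq_all]
  have hmnmem := PySem.List.min?_mem hmn
  have hmxmem := PySem.List.max?_mem hmx
  have einst : (LinearOrder.toDecidableLT : DecidableLT (List Char)) =
      (fun a b => a.decidableLT b) := Subsingleton.elim _ _
  rw [← einst] at hmn hmx
  have hmnmin := @PySem.List.min?_isMin (List Char) (List Char) inferInstance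
    (cs.map (fun c => [c])) (fun x => x) mn hmn
  have hmxmax := @PySem.List.max?_isMax (List Char) (List Char) inferInstance
    (cs.map (fun c => [c])) (fun x => x) mx hmx
  rcases List.mem_map.mp hmnmem with ⟨c0, hc0, hc0e⟩
  rcases List.mem_map.mp hmxmem with ⟨c1, hc1, hc1e⟩
  rw [Bool.eq_iff_iff]
  simp only [List.all_eq_true, Bool.and_eq_true, decide_eq_true_eq]
  constructor
  · intro h
    exact ⟨hc0e ▸ (h c0 hc0).1, hc1e ▸ (h c1 hc1).2⟩
  · rintro ⟨h1, h2⟩ c hc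
    have hmem : ([c] : List Char) ∈ cs.map (fun c => ([c] : List Char)) :=
      List.mem_map.mpr ⟨c, hc, rfl⟩
    exact ⟨le_trans h1 (hmnmin _ hmem), le_trans (hmxmax _ hmem) h2⟩

-- ===== VERDICT (by name: the statement is the Claim_ definition above) =====
theorem symbolCheck_spec : Claim_equal_symbolCheck := by
  intro text start end_ _
  unfold Spec_symbolCheck symbolCheck symbolCheck_alt
  by_cases h : text.length < 1
  · simp [h]
  · have hne : (PySem.Str.upper text).toList ≠ [] := by
      have : text.toList ≠ [] := by
        intro hnil
        exact h (by simp [String.length, hnil])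
      rw [PySem.Str.toList_upper]
      simpa [PySem.Chars.upper] using this
    simp only [h, if_false]
    exact main_eq _ _ _ hne
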